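-- pv_equiv track=rewrite | github.com/nolte/kamerplanter | src/backend/app/domain/engines/sowing_calendar_engine.py | _split_into_periods
-- ===== SOURCE A (Python) =====
-- def _split_into_periods(months: list[int]) -> list[tuple[int, int]]:
--     """Split a list of months into contiguous period tuples.
--
--     Detects circular wrap-around: [8, 9, 10, 11, 12, 1, 2, 3] -> [(8, 3)]
--     where start > end indicates the period crosses the year boundary.
--
--     Non-wrapping: [3, 4, 5, 6, 9, 10] -> [(3, 6), (9, 10)]
--     """
--     if not months:
--         return []
--     sorted_months = sorted(set(months))
--     periods: list[tuple[int, int]] = []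
--     start = sorted_months[0]
--     prev = sorted_months[0]
--     for m in sorted_months[1:]:
--         if m == prev + 1:
--             prev = m
--         else:
--             periods.append((start, prev))
--             start = m
--             prev = m
--     periods.append((start, prev))
--
--     # Detect circular wrap-around: first group includes month 1,
--     # last group includes month 12 -> merge into one wrap-around period.
--     if len(periods) >= 2 and periods[0][0] == 1 and periods[-1][1] == 12:
--         wrap_period = (periods[-1][0], periods[0][1])
--         periods = [wrap_period] + periods[1:-1]
--
--     return periods
-- ===== SOURCE B (Python) =====
-- def _split_into_periods(months: list[int]) -> list[tuple[int, int]]: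
--     """Gap-based re-implementation: find the non-consecutive adjacent pairs
--     once, then zip run starts with run ends (no stateful boundary scan)."""
--     if not months:
--         return []
--     sm = sorted(set(months))
--     gaps = [(a, b) for a, b in zip(sm, sm[1:]) if b != a + 1]
--     starts = [sm[0]] + [b for _, b in gaps]
--     ends = [a for a, _ in gaps] + [sm[-1]]
--     periods = list(zip(starts, ends))
--     if len(periods) >= 2 and periods[0][0] == 1 and periods[-1][1] == 12:
--         wrap_period = (periods[-1][0], periods[0][1])
--         periods = [wrap_period] + periods[1:-1]
--     return periods
-- ===== Notes on version B (the rewrite author's own statement) =====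
-- stated objective: alternative
-- what changed: Replaces A's stateful start/prev boundary scan with a gap-based decomposition: collect the non-consecutive adjacent pairs of the sorted distinct months once, then zip run starts with run ends; the wrap-around merge is kept identical.
import Mathlib
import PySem

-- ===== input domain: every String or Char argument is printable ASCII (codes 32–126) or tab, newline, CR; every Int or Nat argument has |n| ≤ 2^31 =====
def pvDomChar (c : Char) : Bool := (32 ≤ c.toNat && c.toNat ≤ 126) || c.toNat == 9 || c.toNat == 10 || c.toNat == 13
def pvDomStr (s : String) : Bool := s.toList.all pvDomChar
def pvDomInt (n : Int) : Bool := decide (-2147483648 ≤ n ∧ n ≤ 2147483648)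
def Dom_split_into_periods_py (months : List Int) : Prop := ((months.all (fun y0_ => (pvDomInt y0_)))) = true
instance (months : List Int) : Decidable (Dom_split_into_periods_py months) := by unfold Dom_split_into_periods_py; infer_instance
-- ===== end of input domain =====

-- B is an alternative gap-based decomposition of the same run-grouping; equal return value on all inputs.

-- ===== PORT A =====
-- A's for-loop over sorted_months[1:] with state (periods, start, prev)
def pvAFold : List (Int × Int) → Int → Int → List Int → List (Int × Int)
  | periods, start, prev, [] => periods ++ [(start, prev)]
  | periods, start, prev, m :: ms =>
    if m = prev + 1 then pvAFold periods start m ms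
    else pvAFold (periods ++ [(start, prev)]) m m ms

def split_into_periods_py (months : List Int) : List (Int × Int) :=
  if months = [] then []
  else
    let sm := PySem.List.sorted (PySem.Set.ofList months) (fun x => x) false
    -- sorted_months[0]: sm is nonempty here, default never used
    let start := PySem.List.pyGetD sm 0 0
    let prev := start
    let periods := pvAFold [] start prev (PySem.List.slice sm (some 1) none)
    if 2 ≤ periods.length ∧ (PySem.List.pyGetD periods 0 (0, 0)).1 = 1 ∧
        (PySem.List.pyGetD periods (-1) (0, 0)).2 = 12 then
      ((PySem.List.pyGetD periods (-1) (0, 0)).1, (PySem.List.pyGetD periods 0 (0, 0)).2)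
        :: PySem.List.slice periods (some 1) (some (-1))
    else periods

-- ===== PORT B =====
def split_into_periods_py_alt (months : List Int) : List (Int × Int) :=
  if months = [] then []
  else
    let sm := PySem.List.sorted (PySem.Set.ofList months) (fun x => x) false
    let gaps := (sm.zip (PySem.List.slice sm (some 1) none)).filter (fun p => decide (p.2 ≠ p.1 + 1))
    -- sm[0] and sm[-1]: sm is nonempty here, defaults never used
    let starts := PySem.List.pyGetD sm 0 0 :: gaps.map Prod.snd
    let ends := gaps.map Prod.fst ++ [PySem.List.pyGetD sm (-1) 0]
    let periods := starts.zip ends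
    if 2 ≤ periods.length ∧ (PySem.List.pyGetD periods 0 (0, 0)).1 = 1 ∧
        (PySem.List.pyGetD periods (-1) (0, 0)).2 = 12 then
      ((PySem.List.pyGetD periods (-1) (0, 0)).1, (PySem.List.pyGetD periods 0 (0, 0)).2)
        :: PySem.List.slice periods (some 1) (some (-1))
    else periods

-- ===== PRECONDITION & SPEC =====
def Spec_split_into_periods_py (months : List Int) (out : List (Int × Int)) : Prop := out = split_into_periods_py_alt months
instance (months : List Int) (out : List (Int × Int)) : Decidable (Spec_split_into_periods_py months out) := by unfold Spec_split_into_periods_py; infer_instance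

-- ===== CLAIM (what is proved, stated in full; the proofs are below) =====
def Claim_equal_split_into_periods_py : Prop := ∀ (months : List Int), Dom_split_into_periods_py months → Spec_split_into_periods_py months (split_into_periods_py months)

-- ===== LEMMAS AND PROOFS =====

-- A's fold, with the accumulator factored out
def pvCore : Int → Int → List Int → List (Int × Int)
  | start, prev, [] => [(start, prev)]
  | start, prev, m :: ms =>
    if m = prev + 1 then pvCore start m ms else (start, prev) :: pvCore m m ms

lemma pvAFold_eq_core (ms : List Int) : ∀ (periods : List (Int × Int)) (start prev : Int),
    pvAFold periods start prev ms = periods ++ pvCore start prev ms := by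
  induction ms with
  | nil => intro periods start prev; simp [pvAFold, pvCore]
  | cons m t ih =>
    intro periods start prev
    simp only [pvAFold, pvCore]
    by_cases h : m = prev + 1
    · simp [h, ih]
    · simp [h, ih]

def pvGaps (l : List Int) : List (Int × Int) :=
  (l.zip l.tail).filter (fun p => decide (p.2 ≠ p.1 + 1))

lemma pvCore_eq_zip (ms : List Int) : ∀ (start prev : Int),
    pvCore start prev ms =
      (start :: (pvGaps (prev :: ms)).map Prod.snd).zip
        ((pvGaps (prev :: ms)).map Prod.fst ++ [List.getLastD ms prev]) := by
  induction ms with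
  | nil => intro start prev; simp [pvCore, pvGaps]
  | cons m t ih =>
    intro start prev
    have hg : pvGaps (prev :: m :: t) =
        (if m = prev + 1 then [] else [(prev, m)]) ++ pvGaps (m :: t) := by
      by_cases h : m = prev + 1 <;> simp [pvGaps, h]
    by_cases h : m = prev + 1
    · simp only [pvCore, if_pos h, hg, List.nil_append]
      rw [ih]
      cases t <;> simp [List.getLastD]
    · simp only [pvCore, if_neg h, hg]
      rw [ih]
      cases t <;> simp [List.getLastD, List.zip]

lemma pv_periods_eq (x : Int) (rest : List Int) :
    pvAFold [] x x rest =
      (PySem.List.pyGetD (x :: rest) 0 0 :: (pvGaps (x :: rest)).map Prod.snd).zip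
        ((pvGaps (x :: rest)).map Prod.fst ++ [PySem.List.pyGetD (x :: rest) (-1) 0]) := by
  rw [pvAFold_eq_core, pvCore_eq_zip]
  have h1 : PySem.List.pyGetD (x :: rest) 0 0 = x := by
    simp [PySem.List.pyGetD_zero_cons]
  have h2 : PySem.List.pyGetD (x :: rest) (-1) 0 = List.getLastD rest x := by
    rw [PySem.List.pyGetD_neg_one (x :: rest) 0 (by simp)]
    simp [List.getLast_eq_getLastD]
  rw [h1, h2]
  simp

theorem split_into_periods_py_spec_aux (months : List Int) :
    split_into_periods_py months = split_into_periods_py_alt months := by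
  unfold split_into_periods_py split_into_periods_py_alt
  by_cases hm : months = []
  · simp [hm]
  · simp only [if_neg hm]
    have hsm : PySem.List.sorted (PySem.Set.ofList months) (fun x => x) false ≠ [] := by
      intro h
      rw [PySem.List.sorted_eq_nil_iff] at h
      obtain ⟨y, hy⟩ := List.exists_mem_of_ne_nil months hm
      have : y ∈ PySem.Set.ofList months := by
        rw [PySem.Set.mem_ofList]; exact hy
      rw [h] at this
      exact absurd this (List.not_mem_nil)
    cases hc : PySem.List.sorted (PySem.Set.ofList months) (fun x => x) false with
    | nil => exact absurd hc hsm
    | cons x rest =>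
      simp only [PySem.List.slice_from_one, List.tail_cons]
      have h0 : PySem.List.pyGetD (x :: rest) 0 0 = x := by
        simp [PySem.List.pyGetD_zero_cons]
      rw [h0, pv_periods_eq x rest]
      simp [pvGaps]

-- ===== VERDICT (by name: the statement is the Claim_ definition above) =====
theorem split_into_periods_py_spec : Claim_equal_split_into_periods_py := by
  intro months _
  unfold Spec_split_into_periods_py
  exact split_into_periods_py_spec_aux months
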